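-- pv_equiv track=rewrite | github.com/udimaha/jump_model | src/suffix_trees/test/test_occurrences.py | count_naive
-- ===== SOURCE A (Python) =====
-- from typing import List
--
-- def yield_token(string: List[int]):
-- 	for i in range(len(string) + 1):
-- 		for j in range(i):
-- 			yield tuple(string[j:i])
--
-- def count_naive(strings: List[List[int]]):
-- 	occurrences = {}
-- 	for s in strings:
-- 		for token in yield_token(s):
-- 			if token not in occurrences:
-- 				occurrences[token] = 0
-- 			occurrences[token] += 1
-- 	flat = {}
-- 	for k, v in occurrences.items():
-- 		if v <= 1:
-- 			continue
-- 		key = len(k)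
-- 		flat.setdefault(key, []).append(v)
-- 	return flat
-- ===== SOURCE B (Python) =====
-- from typing import List
--
-- def count_naive(strings: List[List[int]]):
-- 	# One pass building the token stream incrementally (no slicing), then a
-- 	# plain dict counter and a replay with a seen-set to keep first-seen order.
-- 	tokens = []
-- 	for s in strings:
-- 		row = []
-- 		for c in s:
-- 			row = [t + (c,) for t in row]
-- 			row.append((c,))
-- 			tokens.extend(row)
-- 	counts = {}
-- 	for t in tokens:
-- 		counts[t] = counts.get(t, 0) + 1
-- 	flat = {}
-- 	seen = set()
-- 	for t in tokens:
-- 		if t in seen: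
-- 			continue
-- 		seen.add(t)
-- 		v = counts[t]
-- 		if v > 1:
-- 			flat.setdefault(len(t), []).append(v)
-- 	return flat
-- ===== Notes on version B (the rewrite author's own statement) =====
-- stated objective: alternative
-- what changed: B replaces A's per-(i,j) slicing generator and its membership-test-then-increment dict loop by an incremental row construction of the same token stream (each row extends the previous suffixes by one element), a single get-based counter pass, and a replay of the stream with a seen-set that emits each distinct token once in first-seen order.
import Mathlib
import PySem

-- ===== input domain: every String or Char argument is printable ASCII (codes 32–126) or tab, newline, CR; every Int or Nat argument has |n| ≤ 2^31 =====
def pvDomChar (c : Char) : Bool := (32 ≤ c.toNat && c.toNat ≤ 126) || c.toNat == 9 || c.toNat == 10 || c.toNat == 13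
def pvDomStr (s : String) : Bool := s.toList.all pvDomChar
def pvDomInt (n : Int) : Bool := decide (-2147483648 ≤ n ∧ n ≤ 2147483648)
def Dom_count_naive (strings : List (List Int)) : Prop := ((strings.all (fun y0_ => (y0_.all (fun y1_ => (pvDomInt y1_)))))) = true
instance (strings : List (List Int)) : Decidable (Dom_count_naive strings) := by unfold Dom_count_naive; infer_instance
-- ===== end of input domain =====

-- B (count_naive_alt) computes the same result by a different route: it builds the substring
-- stream incrementally (each row extends the previous suffixes, no slicing), counts it with a
-- single get-based dict pass, and replays the stream with a seen-set to emit counts > 1 bucketed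
-- by length in first-seen order — an alternative decomposition, not claimed faster.

-- ===== PORT A =====
def yield_token (s : List Int) : List (List Int) :=
  (PySem.List.pyRange 0 (PySem.List.len s + 1) 1).flatMap (fun i =>
    (PySem.List.pyRange 0 i 1).map (fun j =>
      PySem.List.slice s (some j) (some i)))

def count_naive (strings : List (List Int)) : List (Int × List Int) :=
  let occurrences : PySem.Dict (List Int) Int :=
    strings.foldl (fun occ s =>
      (yield_token s).foldl (fun occ token =>
        let occ := if occ.contains token then occ else occ.insert token 0
        occ.insert token (occ.getD token 0 + 1)) occ) PySem.Dict.empty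
  let flat : PySem.Dict Int (List Int) :=
    occurrences.items.foldl (fun flat kv =>
      if kv.2 ≤ 1 then flat
      else flat.modify (PySem.List.len kv.1) [] (fun l => l ++ [kv.2])) PySem.Dict.empty
  flat.items

-- ===== PORT B =====
def count_naive_alt (strings : List (List Int)) : List (Int × List Int) :=
  let tokens : List (List Int) :=
    strings.foldl (fun tokens s =>
      (s.foldl (fun (rt : List (List Int) × List (List Int)) c =>
        let row := rt.1.map (fun t => t ++ [c]) ++ [[c]]
        (row, rt.2 ++ row)) ([], tokens)).2) []
  let counts : PySem.Dict (List Int) Int :=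
    tokens.foldl (fun d t => d.insert t (d.getD t 0 + 1)) PySem.Dict.empty
  let res :=
    tokens.foldl (fun (sf : PySem.Set (List Int) × PySem.Dict Int (List Int)) t =>
      if PySem.Set.contains sf.1 t then sf
      else
        let seen := PySem.Set.add sf.1 t
        let v := counts.getD t 0  -- counts[t]; every t in the stream is a key of counts
        if v > 1 then (seen, sf.2.modify (PySem.List.len t) [] (fun l => l ++ [v]))
        else (seen, sf.2)) (PySem.Set.empty, PySem.Dict.empty)
  res.2.items

-- ===== PRECONDITION & SPEC =====
def Spec_count_naive (strings : List (List Int)) (out : List (Int × List Int)) : Prop := out = count_naive_alt strings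
instance (strings : List (List Int)) (out : List (Int × List Int)) : Decidable (Spec_count_naive strings out) := by unfold Spec_count_naive; infer_instance

-- ===== CLAIM (what is proved, stated in full; the proofs are below) =====
def Claim_equal_count_naive : Prop := ∀ (strings : List (List Int)), Dom_count_naive strings → Spec_count_naive strings (count_naive strings)

-- ===== LEMMAS AND PROOFS =====

-- nonempty suffixes of q, longest first: q[j:] for j = 0..len-1
def pvSuff (q : List Int) : List (List Int) :=
  (List.range q.length).map (fun j => q.drop j)

-- the token stream of one string, in A's yield order
def pvStream (s : List Int) : List (List Int) :=
  (List.range s.length).flatMap (fun k => pvSuff (s.take (k + 1)))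

theorem pvSuff_append (q : List Int) (c : Int) :
    pvSuff (q ++ [c]) = (pvSuff q).map (fun t => t ++ [c]) ++ [[c]] := by
  unfold pvSuff
  rw [List.length_append, List.length_singleton, List.range_succ, List.map_append,
    List.map_map]
  refine congrArg₂ _ (List.map_congr_left ?_) ?_
  · intro j hj
    simp only [Function.comp_apply]
    exact List.drop_append_of_le_length (le_of_lt (List.mem_range.mp hj))
  · simp

theorem pv_yield_token_eq (s : List Int) : yield_token s = pvStream s := by
  unfold yield_token pvStream pvSuff
  have h1 : PySem.List.len s + 1 = ((s.length + 1 : Nat) : Int) := by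
    simp [PySem.List.len_eq]
  rw [h1, PySem.List.pyRange_zero_nat, List.flatMap_map, List.range_succ_eq_map,
    List.flatMap_cons, List.flatMap_map]
  have h0 : List.map (fun j => PySem.List.slice s (some j) (some ((0:Nat):Int)))
      (PySem.List.pyRange 0 ((0:Nat):Int) 1) = [] := by
    norm_num [PySem.List.pyRange_one_eq_nil]
  rw [h0, List.nil_append]
  refine List.flatMap_congr ?_
  intro k hk
  have hk' := List.mem_range.mp hk
  have hlen : (List.take (k + 1) s).length = k + 1 := by
    simp [List.length_take]; omega
  rw [hlen, PySem.List.pyRange_zero_nat, List.map_map]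
  refine List.map_congr_left ?_
  intro j hj
  simp only [Function.comp_apply]
  rw [show ((k.succ : Nat) : Int) = ((k+1 : Nat) : Int) from rfl,
    PySem.List.slice_natCast, List.drop_take]

theorem pvFoldB (s : List Int) : ∀ (q : List Int) (acc : List (List Int)),
    s.foldl (fun rt c =>
        let row := rt.1.map (fun t => t ++ [c]) ++ [[c]]
        (row, rt.2 ++ row)) (pvSuff q, acc)
    = (pvSuff (q ++ s),
       acc ++ (List.range s.length).flatMap (fun k => pvSuff (q ++ s.take (k + 1)))) := by
  induction s with
  | nil => intro q acc; simp
  | cons c cs ih =>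
    intro q acc
    rw [List.foldl_cons]
    simp only []
    have hrow : (pvSuff q).map (fun t => t ++ [c]) ++ [[c]] = pvSuff (q ++ [c]) :=
      (pvSuff_append q c).symm
    rw [hrow, ih (q ++ [c]) (acc ++ pvSuff (q ++ [c]))]
    refine Prod.ext ?_ ?_
    · show pvSuff (q ++ [c] ++ cs) = pvSuff (q ++ c :: cs)
      rw [List.append_assoc]; rfl
    · show acc ++ pvSuff (q ++ [c]) ++
          List.flatMap (fun k => pvSuff (q ++ [c] ++ List.take (k + 1) cs)) (List.range cs.length)
        = acc ++ List.flatMap (fun k => pvSuff (q ++ List.take (k + 1) (c :: cs))) (List.range (c :: cs).length)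
      rw [List.append_assoc]
      refine congrArg _ ?_
      rw [List.length_cons, List.range_succ_eq_map, List.flatMap_cons, List.flatMap_map]
      refine congrArg₂ _ (by simp) (List.flatMap_congr ?_)
      intro k hk
      rw [List.append_assoc]
      rfl

theorem pv_tokens_eq (strings : List (List Int)) :
    strings.foldl (fun tokens s =>
      (s.foldl (fun (rt : List (List Int) × List (List Int)) c =>
        let row := rt.1.map (fun t => t ++ [c]) ++ [[c]]
        (row, rt.2 ++ row)) ([], tokens)).2) []
    = strings.flatMap pvStream := by
  have hfun : (fun (tokens : List (List Int)) (s : List Int) =>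
      (s.foldl (fun (rt : List (List Int) × List (List Int)) c =>
        let row := rt.1.map (fun t => t ++ [c]) ++ [[c]]
        (row, rt.2 ++ row)) ([], tokens)).2)
      = fun tokens s => tokens ++ pvStream s := by
    funext tokens s
    have h2 := pvFoldB s [] tokens
    rw [show pvSuff [] = ([] : List (List Int)) from rfl] at h2
    rw [congrArg Prod.snd h2]
    simp [pvStream]
  rw [hfun, PySem.List.foldl_append_eq_flatMap]
  simp

theorem pv_stepA (occ : PySem.Dict (List Int) Int) (t : List Int) :
    (let occ' := if occ.contains t then occ else occ.insert t 0
     occ'.insert t (occ'.getD t 0 + 1)) = occ.insert t (occ.getD t 0 + 1) := by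
  by_cases h : occ.contains t
  · simp [h]
  · simp only [h, Bool.false_eq_true, if_false]
    rw [PySem.Dict.getD_insert_self, PySem.Dict.insert_insert_self,
      PySem.Dict.getD_of_not_contains occ 0 (Bool.eq_false_iff.mpr h)]

theorem pv_occ_eq (strings : List (List Int)) (yt : List Int → List (List Int)) :
    strings.foldl (fun occ s =>
      (yt s).foldl (fun occ token =>
        let occ := if occ.contains token then occ else occ.insert token 0
        occ.insert token (occ.getD token 0 + 1)) occ) PySem.Dict.empty
    = PySem.Dict.counter (strings.flatMap yt) := by
  rw [← List.foldl_flatMap]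
  rw [PySem.List.foldl_congr_mem _ _ _ _ (fun occ token _ => pv_stepA occ token)]
  rw [PySem.Dict.foldl_insert_getD_add_one_eq_counter]

theorem pv_discard_filter (l : PySem.Set (List Int)) (x : List Int) :
    PySem.Set.discard l x = l.filter (fun y => !(y == x)) := rfl

theorem pvSeenFold {beta : Type} (g : beta → List Int → beta) (L : List (List Int)) :
    ∀ (s : PySem.Set (List Int)) (acc : beta),
    (L.foldl (fun sf t =>
        if PySem.Set.contains sf.1 t then sf
        else (PySem.Set.add sf.1 t, g sf.2 t)) (s, acc)).2
    = ((PySem.Set.ofList L).filter (fun t => !PySem.Set.contains s t)).foldl g acc := by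
  induction L with
  | nil => intro s acc; rfl
  | cons t rest ih =>
    intro s acc
    rw [List.foldl_cons, PySem.Set.ofList_cons, pv_discard_filter, List.filter_cons]
    by_cases h : PySem.Set.contains s t
    · simp only [h, if_true, Bool.not_true, Bool.false_eq_true, if_false]
      rw [ih s acc, List.filter_filter]
      refine congrArg (fun l => List.foldl g acc l) (List.filter_congr ?_)
      intro y _
      by_cases hy : y = t
      · subst hy; simp [(PySem.Set.contains_iff s y).mp h]
      · simp [hy]
    · have hf : PySem.Set.contains s t = false := Bool.eq_false_iff.mpr h
      simp only [hf, Bool.false_eq_true, if_false, Bool.not_false, if_true]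
      rw [List.foldl_cons, ih (PySem.Set.add s t) (g acc t), List.filter_filter]
      refine congrArg (fun l => List.foldl g (g acc t) l) (List.filter_congr ?_)
      intro y _
      have hts : t ∉ s := by
        intro hmem; exact h ((PySem.Set.contains_iff s t).mpr hmem)
      rw [PySem.Set.add_of_not_mem hts]
      by_cases hy : y = t
      · subst hy
        simp [PySem.Set.contains_eq_listContains]
      · simp [PySem.Set.contains_eq_listContains, hy]

-- ===== VERDICT (by name: the statement is the Claim_ definition above) =====
theorem count_naive_spec : Claim_equal_count_naive := by
  intro strings _
  unfold Spec_count_naive count_naive count_naive_alt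
  simp only []
  rw [pv_tokens_eq strings]
  have hyt : strings.flatMap yield_token = strings.flatMap pvStream :=
    List.flatMap_congr (fun s _ => pv_yield_token_eq s)
  rw [pv_occ_eq strings yield_token, hyt]
  rw [PySem.Dict.foldl_insert_getD_add_one_eq_counter]
  set L := strings.flatMap pvStream with hL
  rw [PySem.Dict.items_counter, List.foldl_map]
  have hstep : (fun (sf : PySem.Set (List Int) × PySem.Dict Int (List Int)) t =>
      if PySem.Set.contains sf.1 t then sf
      else
        let seen := PySem.Set.add sf.1 t
        let v := (PySem.Dict.counter L).getD t 0
        if v > 1 then (seen, sf.2.modify (PySem.List.len t) [] (fun l => l ++ [v]))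
        else (seen, sf.2))
      = fun sf t =>
        if PySem.Set.contains sf.1 t then sf
        else (PySem.Set.add sf.1 t,
          (fun (acc : PySem.Dict Int (List Int)) (t : List Int) =>
            if (PySem.Dict.counter L).getD t 0 > 1
            then acc.modify (PySem.List.len t) [] (fun l => l ++ [(PySem.Dict.counter L).getD t 0])
            else acc) sf.2 t) := by
    funext sf t
    by_cases hm : t ∈ sf.1
    · simp [hm]
    · by_cases hc : 1 < List.count t L
      · simp [hm, hc]
      · simp [hm, hc]
  rw [hstep]
  have hsf := pvSeenFold (fun (acc : PySem.Dict Int (List Int)) (t : List Int) =>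
      if (PySem.Dict.counter L).getD t 0 > 1
      then acc.modify (PySem.List.len t) [] (fun l => l ++ [(PySem.Dict.counter L).getD t 0])
      else acc) L PySem.Set.empty PySem.Dict.empty
  rw [hsf]
  have hfilt : ((PySem.Set.ofList L).filter
      (fun t => !PySem.Set.contains PySem.Set.empty t)) = PySem.Set.ofList L := by
    simp [PySem.Set.contains_eq_listContains, PySem.Set.empty]
  rw [hfilt]
  refine congrArg PySem.Dict.items (PySem.List.foldl_congr_mem _ _ _ _ ?_)
  intro acc t _
  simp only [PySem.Dict.getD_counter]
  by_cases hc : ((L.count t : Int)) ≤ 1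
  · have h2 : ¬ ((L.count t : Int) > 1) := by omega
    simp [hc, h2]
  · have h2 : ((L.count t : Int)) > 1 := by omega
    simp [hc, h2]
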